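-- pv_equiv track=rewrite | github.com/YDaewon/Algorithm | 백준/Silver/1431. 시리얼 번호/시리얼 번호.py | small
-- ===== SOURCE A (Python) =====
-- def ssum(str):
--     temp = []
--     for i in str:
--         if ord(i) < 60:
--             temp.append(ord(i) - 48)
--     return sum(temp)
--
-- def small(A, B):
--     if len(A) != len(B):
--         if len(A) < len(B):
--             return 0
--         else:
--             return 1
--     elif ssum(A) != ssum(B):
--         if ssum(A) < ssum(B):
--             return 0
--         else:
--             return 1
--     else:
--         if A == B:
--             return 0
--         for i in range(len(A)):
--             if A[i] == B[i]:
--                 continue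
--             else:
--                 if ord(A[i]) < ord(B[i]):
--                     return 0
--                 else:
--                     return 1
-- ===== SOURCE B (Python) =====
-- def small(A, B):
--     # Length decides immediately; otherwise one fused pass over both strings
--     # maintains the running digit-sum difference and the first mismatch verdict.
--     if len(A) != len(B):
--         return 0 if len(A) < len(B) else 1
--     d = 0
--     first = None
--     for a, b in zip(A, B):
--         if ord(a) < 60:
--             d += ord(a) - 48
--         if ord(b) < 60:
--             d -= ord(b) - 48
--         if first is None and a != b:
--             first = a < b
--     if d != 0:
--         return 0 if d < 0 else 1
--     return 0 if first is None or first else 1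
-- ===== Notes on version B (the rewrite author's own statement) =====
-- stated objective: alternative
-- what changed: Replaces A's staged passes (two full ssum scans, an equality test, then a second index loop for the first mismatch) with one fused zip pass that accumulates the digit-sum difference and records the first-mismatch verdict in a single traversal.
import Mathlib
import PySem

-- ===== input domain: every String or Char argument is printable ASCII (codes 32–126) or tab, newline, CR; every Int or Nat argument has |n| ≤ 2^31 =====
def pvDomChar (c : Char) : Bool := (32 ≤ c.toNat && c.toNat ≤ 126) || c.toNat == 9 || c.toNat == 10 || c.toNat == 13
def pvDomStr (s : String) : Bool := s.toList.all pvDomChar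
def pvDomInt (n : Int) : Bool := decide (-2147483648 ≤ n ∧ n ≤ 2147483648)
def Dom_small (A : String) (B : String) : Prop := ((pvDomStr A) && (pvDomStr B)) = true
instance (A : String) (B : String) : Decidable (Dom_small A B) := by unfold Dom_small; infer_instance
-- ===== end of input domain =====

-- B fuses A's staged passes (two ssum scans + equality test + mismatch loop) into one
-- zip pass carrying the digit-sum difference and the first-mismatch verdict; objective: alternative.

-- ===== PORT A =====
-- ssum: temp list of (ord(i)-48) for chars with ord(i)<60, then sum
def ssumA (s : String) : Int :=
  ((s.toList.filter (fun c => c.toNat < 60)).map (fun c => (c.toNat : Int) - 48)).sum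

-- the 'for i in range(len(A))' loop of A (with equal lengths and A ≠ B a differing
-- pair is always hit, so the fall-through is unreachable there)
def smallLoop : List Char → List Char → Int
  | a :: as, b :: bs =>
      if a = b then smallLoop as bs
      else if a.toNat < b.toNat then 0 else 1
  | _, _ => 0

def small (A : String) (B : String) : Int :=
  if PySem.Str.len A ≠ PySem.Str.len B then
    if PySem.Str.len A < PySem.Str.len B then 0 else 1
  else if ssumA A ≠ ssumA B then
    if ssumA A < ssumA B then 0 else 1
  else if A = B then 0
  else smallLoop A.toList B.toList

-- ===== PORT B =====
-- one step of Source B's fused loop: update running digit-sum difference d and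
-- the first-mismatch verdict (None until a mismatch is seen)
def stepB (st : Int × Option Bool) (p : Char × Char) : Int × Option Bool :=
  let d1 := st.1 + (if p.1.toNat < 60 then (p.1.toNat : Int) - 48 else 0)
  let d2 := d1 - (if p.2.toNat < 60 then (p.2.toNat : Int) - 48 else 0)
  let f := match st.2 with
    | some x => some x
    | none => if p.1 = p.2 then none else some (decide (p.1.toNat < p.2.toNat))
  (d2, f)

def small_alt (A : String) (B : String) : Int :=
  if PySem.Str.len A ≠ PySem.Str.len B then
    if PySem.Str.len A < PySem.Str.len B then 0 else 1
  else
    let r := (A.toList.zip B.toList).foldl stepB (0, none)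
    if r.1 ≠ 0 then
      if r.1 < 0 then 0 else 1
    else
      match r.2 with
      | none => 0
      | some t => if t then 0 else 1

-- ===== PRECONDITION & SPEC =====
def Spec_small (A : String) (B : String) (out : Int) : Prop := out = small_alt A B
instance (A : String) (B : String) (out : Int) : Decidable (Spec_small A B out) := by unfold Spec_small; infer_instance

-- ===== CLAIM =====
def Claim_equal_small : Prop := ∀ (A : String) (B : String), Dom_small A B → Spec_small A B (small A B)

-- ===== LEMMAS AND PROOFS =====

-- digit-sum of a char list (ssumA on the list level)
def sList (l : List Char) : Int :=
  ((l.filter (fun c => c.toNat < 60)).map (fun c => (c.toNat : Int) - 48)).sum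

-- first-mismatch verdict of two equal-length lists
def fm : List Char → List Char → Option Bool
  | a :: as, b :: bs =>
      if a = b then fm as bs else some (decide (a.toNat < b.toNat))
  | _, _ => none

theorem char_toNat_inj (a b : Char) (h : a.toNat = b.toNat) : a = b := by
  apply Char.ext
  unfold Char.toNat at h
  exact UInt32.toNat_inj.mp h

theorem fold_zip (as : List Char) : ∀ (bs : List Char) (d0 : Int) (f0 : Option Bool),
    as.length = bs.length →
    (as.zip bs).foldl stepB (d0, f0)
      = (d0 + sList as - sList bs,
         match f0 with | some x => some x | none => fm as bs) := by
  induction as with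
  | nil =>
      intro bs d0 f0 h
      cases bs with
      | nil => cases f0 <;> simp [sList, fm]
      | cons b bs => simp at h
  | cons a as ih =>
      intro bs d0 f0 h
      cases bs with
      | nil => simp at h
      | cons b bs =>
          simp only [List.length_cons, Nat.add_right_cancel_iff] at h
          have := ih bs
            (d0 + (if a.toNat < 60 then (a.toNat : Int) - 48 else 0)
                - (if b.toNat < 60 then (b.toNat : Int) - 48 else 0))
            (match f0 with
              | some x => some x
              | none => if a = b then none else some (decide (a.toNat < b.toNat))) h
          simp only [List.zip_cons_cons, List.foldl_cons, stepB, this,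
            Prod.mk.injEq]
          constructor
          · by_cases ha : a.toNat < 60 <;> by_cases hb : b.toNat < 60 <;>
              simp [sList, ha, hb] <;> ring
          · cases f0 with
            | some x => rfl
            | none =>
                by_cases hab : a = b
                · simp [fm, hab]
                · simp [fm, hab]

theorem fm_none_iff (as : List Char) : ∀ bs : List Char,
    as.length = bs.length → (fm as bs = none ↔ as = bs) := by
  induction as with
  | nil =>
      intro bs h
      cases bs with
      | nil => simp [fm]
      | cons b bs => simp at h
  | cons a as ih =>
      intro bs h
      cases bs with
      | nil => simp at h
      | cons b bs =>
          simp only [List.length_cons, Nat.add_right_cancel_iff] at h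
          by_cases hab : a = b
          · simp [fm, hab, ih bs h]
          · simp [fm, hab]

theorem smallLoop_fm (as : List Char) : ∀ bs : List Char,
    smallLoop as bs = match fm as bs with
      | none => 0
      | some t => if t then 0 else 1 := by
  induction as with
  | nil => intro bs; cases bs <;> simp [smallLoop, fm]
  | cons a as ih =>
      intro bs
      cases bs with
      | nil => simp [smallLoop, fm]
      | cons b bs =>
          by_cases hab : a = b
          · simp [smallLoop, fm, hab, ih bs]
          · have hne : a.toNat ≠ b.toNat := fun hc => hab (char_toNat_inj a b hc)
            by_cases hlt : a.toNat < b.toNat <;>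
              simp [smallLoop, fm, hab, hlt]

-- ===== VERDICT =====
theorem small_spec : Claim_equal_small := by
  intro A B _
  unfold Spec_small small small_alt
  have hA : PySem.Str.len A = (A.toList.length : Int) := by simp [PySem.Str.len]
  have hB : PySem.Str.len B = (B.toList.length : Int) := by simp [PySem.Str.len]
  by_cases hlen : PySem.Str.len A = PySem.Str.len B
  · have hl : A.toList.length = B.toList.length := by
      rw [hA, hB] at hlen; exact_mod_cast hlen
    rw [fold_zip A.toList B.toList 0 none hl]
    have hsA : sList A.toList = ssumA A := rfl
    have hsB : sList B.toList = ssumA B := rfl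
    simp only [hsA, hsB, zero_add, hlen, ne_eq, not_true_eq_false, if_false]
    by_cases hs : ssumA A = ssumA B
    · have hd : ssumA A - ssumA B = 0 := by omega
      simp only [hs, not_true_eq_false, if_false]
      by_cases hAB : A = B
      · subst hAB
        have hfm : fm A.toList A.toList = none := (fm_none_iff _ _ rfl).mpr rfl
        simp [hfm]
      · have hlne : A.toList ≠ B.toList := fun hc => hAB (String.toList_inj.mp hc)
        have hfm : fm A.toList B.toList ≠ none :=
          fun hc => hlne ((fm_none_iff _ _ hl).mp hc)
        simp only [hAB, if_false]
        rw [smallLoop_fm]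
        cases hf : fm A.toList B.toList with
        | none => exact absurd hf hfm
        | some t => simp
    · have hd : ssumA A - ssumA B ≠ 0 := by omega
      simp only [hs, not_false_eq_true, if_true, hd]
      by_cases hlt : ssumA A < ssumA B
      · have : ssumA A - ssumA B < 0 := by omega
        simp [hlt, this]
      · have : ¬ (ssumA A - ssumA B < 0) := by omega
        simp [hlt, this]
  · simp only [ne_eq, hlen, not_false_eq_true, if_true]
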